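-- pv_equiv track=rewrite | github.com/oimiragieo/tensor-grep | src/tensor_grep/backends/cudf_backend.py | _normalize_device_chunks
-- ===== SOURCE A (Python) =====
-- def _normalize_device_chunks(
--     device_chunks_mb: list[tuple[int, int]],
-- ) -> list[tuple[int, int]]:
--     """
--     Deduplicate device entries while preserving first-seen order.
--     If a device appears multiple times, keep the largest configured chunk size.
--     """
--     normalized: list[tuple[int, int]] = []
--     index_by_device: dict[int, int] = {}
--     for device_id, chunk_mb in device_chunks_mb:
--         if device_id not in index_by_device:
--             index_by_device[device_id] = len(normalized)
--             normalized.append((device_id, chunk_mb))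
--             continue
--         slot = index_by_device[device_id]
--         existing_device_id, existing_chunk_mb = normalized[slot]
--         if chunk_mb > existing_chunk_mb:
--             normalized[slot] = (existing_device_id, chunk_mb)
--     return normalized
-- ===== SOURCE B (Python) =====
-- def _normalize_device_chunks(
--     device_chunks_mb: list[tuple[int, int]],
-- ) -> list[tuple[int, int]]:
--     # Pass 1: max chunk per device across the whole input.
--     max_by_device: dict[int, int] = {}
--     for device_id, chunk_mb in device_chunks_mb:
--         if device_id not in max_by_device or chunk_mb > max_by_device[device_id]:
--             max_by_device[device_id] = chunk_mb
--     # Pass 2: emit each device once, in first-seen order, with its max.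
--     result: list[tuple[int, int]] = []
--     seen: set[int] = set()
--     for device_id, _ in device_chunks_mb:
--         if device_id not in seen:
--             seen.add(device_id)
--             result.append((device_id, max_by_device[device_id]))
--     return result
-- ===== Notes on version B (the rewrite author's own statement) =====
-- stated objective: alternative
-- what changed: A deduplicates in a single pass, patching earlier output slots in place via an index-by-device table; B makes two separate passes: it first builds the full max-chunk-per-device table, then emits each device once in first-seen order from that table, never mutating the output.
import Mathlib
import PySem

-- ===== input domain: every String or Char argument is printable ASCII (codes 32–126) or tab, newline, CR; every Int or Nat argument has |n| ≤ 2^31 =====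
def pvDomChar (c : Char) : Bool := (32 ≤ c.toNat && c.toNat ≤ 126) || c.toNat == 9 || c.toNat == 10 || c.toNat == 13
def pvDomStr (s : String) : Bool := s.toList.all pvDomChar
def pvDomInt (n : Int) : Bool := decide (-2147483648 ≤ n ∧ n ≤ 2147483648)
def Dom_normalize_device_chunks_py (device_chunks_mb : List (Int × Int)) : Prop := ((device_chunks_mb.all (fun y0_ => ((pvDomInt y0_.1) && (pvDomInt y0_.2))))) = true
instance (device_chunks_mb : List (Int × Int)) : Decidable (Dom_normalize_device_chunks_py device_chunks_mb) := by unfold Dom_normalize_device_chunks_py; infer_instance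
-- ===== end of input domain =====

-- B replaces A's single pass (which patches earlier output slots in place through an
-- index-by-device table) by two passes: build the max-per-device table, then emit
-- each device once in first-seen order; same cost, no in-place mutation.

-- ===== PORT A =====
-- one loop iteration of A: state = (normalized, index_by_device)
def pvAStep (st : List (Int × Int) × PySem.Dict Int Int) (p : Int × Int) :
    List (Int × Int) × PySem.Dict Int Int :=
  match st.2.get? p.1 with
  | none => (st.1 ++ [(p.1, p.2)], st.2.insert p.1 (st.1.length : Int))
  | some slot =>
    match PySem.List.pyGet? st.1 slot with
    | none => st  -- unreachable: every stored slot indexes into normalized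
    | some e => if p.2 > e.2 then (PySem.List.pySetD st.1 slot (e.1, p.2), st.2) else st

def normalize_device_chunks_py (device_chunks_mb : List (Int × Int)) : List (Int × Int) :=
  (device_chunks_mb.foldl pvAStep ([], PySem.Dict.empty)).1

-- ===== PORT B =====
-- pass 1 iteration: running max per device
def pvBMaxStep (m : PySem.Dict Int Int) (p : Int × Int) : PySem.Dict Int Int :=
  match m.get? p.1 with
  | none => m.insert p.1 p.2
  | some v => if p.2 > v then m.insert p.1 p.2 else m

-- pass 2 iteration: state = (result, seen)
def pvBEmit (m : PySem.Dict Int Int) (st : List (Int × Int) × PySem.Set Int) (p : Int × Int) :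
    List (Int × Int) × PySem.Set Int :=
  if PySem.Set.contains st.2 p.1 then st
  else
    match m.get? p.1 with
    | none => st  -- unreachable: every device of the list is in the max table
    | some v => (st.1 ++ [(p.1, v)], PySem.Set.add st.2 p.1)

def normalize_device_chunks_py_alt (device_chunks_mb : List (Int × Int)) : List (Int × Int) :=
  let m := device_chunks_mb.foldl pvBMaxStep PySem.Dict.empty
  (device_chunks_mb.foldl (pvBEmit m) ([], PySem.Set.empty)).1

-- ===== PRECONDITION & SPEC =====
def Spec_normalize_device_chunks_py (device_chunks_mb : List (Int × Int)) (out : List (Int × Int)) : Prop := out = normalize_device_chunks_py_alt device_chunks_mb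
instance (device_chunks_mb : List (Int × Int)) (out : List (Int × Int)) : Decidable (Spec_normalize_device_chunks_py device_chunks_mb out) := by unfold Spec_normalize_device_chunks_py; infer_instance

-- ===== CLAIM (what is proved, stated in full; the proofs are below) =====
def Claim_equal_normalize_device_chunks_py : Prop := ∀ (device_chunks_mb : List (Int × Int)), Dom_normalize_device_chunks_py device_chunks_mb → Spec_normalize_device_chunks_py device_chunks_mb (normalize_device_chunks_py device_chunks_mb)

-- ===== LEMMAS AND PROOFS =====

-- first-seen distinct device ids, in order
def pvKeys (xs : List (Int × Int)) : List Int :=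
  xs.foldl (fun acc p => PySem.Set.add acc p.1) []

-- max chunk recorded for device d after scanning xs (none if d absent)
def pvMx (xs : List (Int × Int)) (d : Int) : Option Int :=
  xs.foldl (fun o p =>
    if p.1 = d then some (match o with | none => p.2 | some v => if p.2 > v then p.2 else v) else o) none

theorem pvKeys_eq_ofList (xs : List (Int × Int)) :
    pvKeys xs = PySem.Set.ofList (xs.map Prod.fst) := by
  simp [pvKeys, PySem.Set.ofList_eq_foldl, List.foldl_map]

theorem pvKeys_nodup (xs : List (Int × Int)) : (pvKeys xs).Nodup := by
  rw [pvKeys_eq_ofList]; exact PySem.Set.nodup_ofList _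

theorem mem_pvKeys (xs : List (Int × Int)) (d : Int) :
    d ∈ pvKeys xs ↔ d ∈ xs.map Prod.fst := by
  rw [pvKeys_eq_ofList]; exact PySem.Set.mem_ofList _ _

theorem pvKeys_snoc (xs : List (Int × Int)) (p : Int × Int) :
    pvKeys (xs ++ [p]) = PySem.Set.add (pvKeys xs) p.1 := by
  simp [pvKeys]

theorem pvMx_snoc (xs : List (Int × Int)) (p : Int × Int) (d : Int) :
    pvMx (xs ++ [p]) d =
      if p.1 = d then
        some (match pvMx xs d with | none => p.2 | some v => if p.2 > v then p.2 else v)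
      else pvMx xs d := by
  simp [pvMx]

-- replacing the slot of d in the tabulated list = tabulating an updated function
theorem set_map_idxOf (l : List Int) (d v : Int) (f : Int → Int)
    (hnd : l.Nodup) (hm : d ∈ l) :
    (l.map (fun k => (k, f k))).set (l.idxOf d) (d, v) =
      l.map (fun k => (k, if k = d then v else f k)) := by
  induction l with
  | nil => cases hm
  | cons a t ih =>
    rcases List.nodup_cons.mp hnd with ⟨hna, hnt⟩
    by_cases h : a = d
    · subst h
      simp only [List.idxOf_cons_self, List.map_cons, List.set_cons_zero]
      congr 1
      refine (List.map_congr_left fun k hk => ?_)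
      have : ¬ k = a := fun he => hna (he ▸ hk)
      simp [this]
    · have hm' : d ∈ t := by cases hm with | head => exact absurd rfl h | tail _ h' => exact h'
      rw [List.idxOf_cons_ne _ h]
      simp only [List.map_cons, List.set_cons_succ]
      rw [ih hnt hm']
      simp [h]

-- the full invariant of A's loop state
theorem pvA_inv (xs : List (Int × Int)) :
    (xs.foldl pvAStep ([], PySem.Dict.empty)).1 =
      (pvKeys xs).map (fun k => (k, (pvMx xs k).getD 0)) ∧
    (∀ d : Int, (xs.foldl pvAStep ([], PySem.Dict.empty)).2.get? d =
      if d ∈ pvKeys xs then some (((pvKeys xs).idxOf d : Nat) : Int) else none) ∧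
    (∀ d : Int, d ∈ pvKeys xs ↔ (pvMx xs d).isSome) := by
  induction xs using List.reverseRecOn with
  | nil => refine ⟨rfl, fun d => by simp [pvKeys, PySem.Dict.get?_empty], fun d => by simp [pvKeys, pvMx]⟩
  | append_singleton xs p ih =>
    obtain ⟨h1, h2, h3⟩ := ih
    rw [List.foldl_append]
    simp only [List.foldl_cons, List.foldl_nil]
    set S := xs.foldl pvAStep ([], PySem.Dict.empty) with hSdef
    rw [pvKeys_snoc]
    by_cases hc : p.1 ∈ pvKeys xs
    · have hadd : PySem.Set.add (pvKeys xs) p.1 = pvKeys xs := by simp [PySem.Set.add, hc]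
      rw [hadd]
      have hg : S.2.get? p.1 = some (((pvKeys xs).idxOf p.1 : Nat) : Int) := by
        rw [h2 p.1]; simp [hc]
      have hlt : (pvKeys xs).idxOf p.1 < (pvKeys xs).length := List.idxOf_lt_length_of_mem hc
      have hsome : pvMx xs p.1 = some ((pvMx xs p.1).getD 0) := by
        have hs := (h3 p.1).mp hc
        cases hmx : pvMx xs p.1 with
        | none => rw [hmx] at hs; simp at hs
        | some v => simp
      have hread : PySem.List.pyGet? S.1 (((pvKeys xs).idxOf p.1 : Nat) : Int) =
          some (p.1, (pvMx xs p.1).getD 0) := by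
        rw [h1, PySem.List.pyGet?_natCast]
        simp [hlt, List.getElem_idxOf hlt]
      simp only [pvAStep, hg, hread]
      by_cases hgt : p.2 > (pvMx xs p.1).getD 0
      · simp only [if_pos hgt]
        refine ⟨?_, fun d => h2 d, ?_⟩
        · rw [h1, PySem.List.pySetD_natCast,
            set_map_idxOf _ _ _ _ (pvKeys_nodup xs) hc]
          refine List.map_congr_left fun k hk => ?_
          by_cases hkp : k = p.1
          · subst hkp
            rw [pvMx_snoc, if_pos rfl, hsome]
            simp [hgt]
          · have : ¬ p.1 = k := Ne.symm hkp
            simp [pvMx_snoc, hkp, this]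
        · intro d
          by_cases hdp : p.1 = d
          · subst hdp; simp [pvMx_snoc, hc]
          · simp [pvMx_snoc, hdp, h3 d]
      · simp only [if_neg hgt]
        refine ⟨?_, fun d => h2 d, ?_⟩
        · rw [h1]
          refine List.map_congr_left fun k hk => ?_
          by_cases hkp : k = p.1
          · subst hkp
            rw [pvMx_snoc, if_pos rfl, hsome]
            simp [hgt]
          · have : ¬ p.1 = k := Ne.symm hkp
            simp [pvMx_snoc, this]
        · intro d
          by_cases hdp : p.1 = d
          · subst hdp; simp [pvMx_snoc, hc]
          · simp [pvMx_snoc, hdp, h3 d]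
    · have hadd : PySem.Set.add (pvKeys xs) p.1 = pvKeys xs ++ [p.1] := by
        simp [PySem.Set.add, hc]
      rw [hadd]
      have hg : S.2.get? p.1 = none := by rw [h2 p.1]; simp [hc]
      simp only [pvAStep, hg]
      have hmxnone : pvMx xs p.1 = none := by
        cases hmx : pvMx xs p.1 with
        | none => rfl
        | some v => exact absurd ((h3 p.1).mpr (by simp [hmx])) hc
      refine ⟨?_, ?_, ?_⟩
      · rw [h1, List.map_append]
        congr 1
        · refine List.map_congr_left fun k hk => ?_
          have : ¬ p.1 = k := fun he => hc (he ▸ hk)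
          simp [pvMx_snoc, this]
        · simp [pvMx_snoc, hmxnone]
      · intro d
        have hlen : S.1.length = (pvKeys xs).length := by rw [h1]; simp
        rw [PySem.Dict.get?_insert]
        by_cases hdp : d = p.1
        · subst hdp; simp [List.idxOf_append, hc, hlen]
        · rw [if_neg hdp, h2 d]
          by_cases hdm : d ∈ pvKeys xs
          · simp [hdm, hdp, List.idxOf_append]
          · simp [hdm, hdp]
      · intro d
        by_cases hdp : p.1 = d
        · subst hdp; simp [pvMx_snoc, hmxnone]
        · simp [pvMx_snoc, hdp, h3 d, Ne.symm hdp]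

theorem pvB_max_get (xs : List (Int × Int)) : ∀ d : Int,
    (xs.foldl pvBMaxStep PySem.Dict.empty).get? d = pvMx xs d := by
  induction xs using List.reverseRecOn with
  | nil => intro d; simp [pvMx, PySem.Dict.get?_empty]
  | append_singleton xs p ih =>
    intro d
    rw [List.foldl_append]
    simp only [List.foldl_cons, List.foldl_nil]
    rw [pvMx_snoc, ← ih d]
    set M := xs.foldl pvBMaxStep PySem.Dict.empty with hMdef
    by_cases hd : p.1 = d
    · subst hd
      cases hm : M.get? p.1 with
      | none => simp [pvBMaxStep, hm, PySem.Dict.get?_insert_self]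
      | some v =>
        by_cases hgt : p.2 > v
        · simp [pvBMaxStep, hm, hgt, PySem.Dict.get?_insert_self]
        · simp [pvBMaxStep, hm, hgt]
    · cases hm : M.get? p.1 with
      | none => simp [pvBMaxStep, hm, PySem.Dict.get?_insert, hd, Ne.symm hd]
      | some v =>
        by_cases hgt : p.2 > v
        · simp [pvBMaxStep, hm, hgt, PySem.Dict.get?_insert, hd, Ne.symm hd]
        · simp [pvBMaxStep, hm, hgt, hd]


theorem pvB_emit_inv (m : PySem.Dict Int Int) (xs : List (Int × Int))
    (h : ∀ p ∈ xs, (m.get? p.1).isSome) :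
    (xs.foldl (pvBEmit m) ([], PySem.Set.empty)).1 =
      (pvKeys xs).map (fun k => (k, (m.get? k).getD 0)) ∧
    (xs.foldl (pvBEmit m) ([], PySem.Set.empty)).2 = pvKeys xs := by
  induction xs using List.reverseRecOn with
  | nil => exact ⟨rfl, rfl⟩
  | append_singleton xs p ih =>
    obtain ⟨ih1, ih2⟩ := ih (fun q hq => h q (List.mem_append_left _ hq))
    have hp : (m.get? p.1).isSome := h p (by simp)
    rw [List.foldl_append]
    simp only [List.foldl_cons, List.foldl_nil]
    rw [pvKeys_snoc]
    set ST := xs.foldl (pvBEmit m) ([], PySem.Set.empty) with hSTdef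
    by_cases hc : p.1 ∈ pvKeys xs
    · simp [pvBEmit, ih2, hc, PySem.Set.add, ih1]
    · obtain ⟨v, hv⟩ := Option.isSome_iff_exists.mp hp
      simp [pvBEmit, ih2, hc, hv, PySem.Set.add, ih1]


-- ===== VERDICT (by name: the statement is the Claim_ definition above) =====
theorem normalize_device_chunks_py_spec : Claim_equal_normalize_device_chunks_py := by
  intro xs _
  show normalize_device_chunks_py xs = normalize_device_chunks_py_alt xs
  obtain ⟨hA, _, hS⟩ := pvA_inv xs
  have hmem : ∀ p ∈ xs, ((xs.foldl pvBMaxStep PySem.Dict.empty).get? p.1).isSome := by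
    intro p hp
    rw [pvB_max_get]
    exact (hS p.1).mp ((mem_pvKeys xs p.1).mpr (List.mem_map_of_mem hp))
  obtain ⟨hB, _⟩ := pvB_emit_inv (xs.foldl pvBMaxStep PySem.Dict.empty) xs hmem
  rw [normalize_device_chunks_py, normalize_device_chunks_py_alt, hA, hB]
  exact (List.map_congr_left fun k _ => by rw [pvB_max_get])
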